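-- pv_equiv track=rewrite | github.com/BinbinGood/Algorithms | 进阶班/class06&07动态规划/机器人走路.py | RobotWalk3
-- ===== SOURCE A (Python) =====
-- def RobotWalk3(N, M, K, P):
--     if N < 2 or M < 1 or K < 1 or M > N or P < 1 or P > N:
--         return 0
--     dp = [[-1] * (K + 1) for _ in range(N + 1)]
--     for rest in range(0, K + 1, 1):
--         for cur in range(1, N + 1, 1):
--             if rest == 0:
--                 dp[cur][rest] = 1 if cur == P else 0
--             elif cur == 1:
--                 dp[cur][rest] = dp[2][rest - 1]
--             elif cur == N:
--                 dp[cur][rest] = dp[N - 1][rest - 1]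
--             else:
--                 dp[cur][rest] = dp[cur - 1][rest - 1] + dp[cur + 1][rest - 1]
--     return dp[M][K]
-- ===== SOURCE B (Python) =====
-- def RobotWalk3(N, M, K, P):
--     # forward propagation from M: w[c] = number of length-t walks M -> c;
--     # contributions are PUSHED to neighbours (scatter), one O(N) vector, no table
--     if N < 2 or M < 1 or K < 1 or M > N or P < 1 or P > N:
--         return 0
--     w = [0] * (N + 2)
--     w[M] = 1
--     for _ in range(K):
--         nw = [0] * (N + 2)
--         for c in range(1, N + 1):
--             v = w[c]
--             if c == 1:
--                 nw[2] += v
--             elif c == N: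
--                 nw[N - 1] += v
--             else:
--                 nw[c - 1] += v
--                 nw[c + 1] += v
--         w = nw
--     return w[P]
-- ===== Notes on version B (the rewrite author's own statement) =====
-- stated objective: alternative
-- what changed: A fills a full (N+1)x(K+1) backward table dp[cur][rest] of path counts toward P and reads dp[M][K]; B propagates a single O(N) vector forward from M for K steps, pushing (scattering) each cell's count to its neighbours, and reads entry P, relying on the symmetry of the walk count in its endpoints.
import Mathlib
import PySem

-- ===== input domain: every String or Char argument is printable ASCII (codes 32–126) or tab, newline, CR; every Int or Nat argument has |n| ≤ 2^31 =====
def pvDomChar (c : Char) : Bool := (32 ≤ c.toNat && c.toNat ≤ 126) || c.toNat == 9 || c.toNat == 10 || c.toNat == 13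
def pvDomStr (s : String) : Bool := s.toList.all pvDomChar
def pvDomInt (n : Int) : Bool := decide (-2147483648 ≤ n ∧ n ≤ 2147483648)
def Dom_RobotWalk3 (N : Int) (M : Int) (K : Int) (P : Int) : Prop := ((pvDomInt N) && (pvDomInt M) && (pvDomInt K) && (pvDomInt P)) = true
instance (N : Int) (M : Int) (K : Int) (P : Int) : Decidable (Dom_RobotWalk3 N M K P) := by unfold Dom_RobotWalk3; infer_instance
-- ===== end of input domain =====

-- B replaces A's (N+1)x(K+1) backward table (paths cur->P) by forward scatter propagation
-- from M with a single O(N) rolling vector; objective: alternative dataflow (and O(N) memory).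

-- ===== PORT A =====
-- literal transliteration of A's bottom-up table fill (loop bodies as named helpers);
-- all indices are provably in range and nonnegative, so pyGetD/pySetD are exact.
def stepA (N : Int) (P : Int) (rest : Int) (dp : List (List Int)) (cur : Int) : List (List Int) :=
  let v : Int :=
    if rest = 0 then (if cur = P then 1 else 0)
    else if cur = 1 then PySem.List.pyGetD (PySem.List.pyGetD dp 2 []) (rest - 1) 0
    else if cur = N then PySem.List.pyGetD (PySem.List.pyGetD dp (N - 1) []) (rest - 1) 0
    else PySem.List.pyGetD (PySem.List.pyGetD dp (cur - 1) []) (rest - 1) 0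
         + PySem.List.pyGetD (PySem.List.pyGetD dp (cur + 1) []) (rest - 1) 0
  PySem.List.pySetD dp cur (PySem.List.pySetD (PySem.List.pyGetD dp cur []) rest v)

def rowLoopA (N : Int) (P : Int) (dp : List (List Int)) (rest : Int) : List (List Int) :=
  (PySem.List.pyRange 1 (N + 1) 1).foldl (stepA N P rest) dp

def RobotWalk3 (N : Int) (M : Int) (K : Int) (P : Int) : Int :=
  if N < 2 ∨ M < 1 ∨ K < 1 ∨ M > N ∨ P < 1 ∨ P > N then 0
  else
    let dp0 : List (List Int) := List.replicate (N + 1).toNat (List.replicate (K + 1).toNat (-1))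
    let dp := (PySem.List.pyRange 0 (K + 1) 1).foldl (rowLoopA N P) dp0
    PySem.List.pyGetD (PySem.List.pyGetD dp M []) K 0

-- ===== PORT B =====
-- literal transliteration of Source B (forward scatter with one rolling vector)
def stepB (N : Int) (w : List Int) (nw : List Int) (c : Int) : List Int :=
  let v := PySem.List.pyGetD w c 0
  if c = 1 then PySem.List.pySetD nw 2 (PySem.List.pyGetD nw 2 0 + v)
  else if c = N then PySem.List.pySetD nw (N - 1) (PySem.List.pyGetD nw (N - 1) 0 + v)
  else
    let nw1 := PySem.List.pySetD nw (c - 1) (PySem.List.pyGetD nw (c - 1) 0 + v)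
    PySem.List.pySetD nw1 (c + 1) (PySem.List.pyGetD nw1 (c + 1) 0 + v)

def stepRowB (N : Int) (w : List Int) : List Int :=
  (PySem.List.pyRange 1 (N + 1) 1).foldl (stepB N w) (List.replicate (N + 2).toNat 0)

def RobotWalk3_alt (N : Int) (M : Int) (K : Int) (P : Int) : Int :=
  if N < 2 ∨ M < 1 ∨ K < 1 ∨ M > N ∨ P < 1 ∨ P > N then 0
  else
    let w0 := PySem.List.pySetD (List.replicate (N + 2).toNat 0) M 1
    let w := (PySem.List.pyRange 0 K 1).foldl (fun w _ => stepRowB N w) w0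
    PySem.List.pyGetD w P 0

-- ===== PRECONDITION & SPEC =====
def Spec_RobotWalk3 (N : Int) (M : Int) (K : Int) (P : Int) (out : Int) : Prop := out = RobotWalk3_alt N M K P
instance (N : Int) (M : Int) (K : Int) (P : Int) (out : Int) : Decidable (Spec_RobotWalk3 N M K P out) := by unfold Spec_RobotWalk3; infer_instance

-- ===== CLAIM (what is proved, stated in full; the proofs are below) =====
def Claim_equal_RobotWalk3 : Prop := ∀ (N : Int) (M : Int) (K : Int) (P : Int), Dom_RobotWalk3 N M K P → Spec_RobotWalk3 N M K P (RobotWalk3 N M K P)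

-- ===== LEMMAS AND PROOFS =====

-- cnt N P r c = number of r-step walks of the robot from c that end at P (the DP recurrence)
def cnt (N P : Int) : Nat → Int → Int
  | 0, c => if c = P then 1 else 0
  | r + 1, c =>
      if c = 1 then cnt N P r 2
      else if c = N then cnt N P r (N - 1)
      else cnt N P r (c - 1) + cnt N P r (c + 1)

-- generic: folding a step function that advances an indexed invariant along a range
theorem foldl_pyRange_inv {α : Type} (f : α → Int → α) (S : Int → α) (b : Int) :
    ∀ (d : Nat) (a : Int), (b - a).toNat = d → a ≤ b →
    (∀ c, a ≤ c → c < b → f (S c) c = S (c + 1)) →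
    (PySem.List.pyRange a b 1).foldl f (S a) = S b := by
  intro d
  induction d with
  | zero =>
    intro a hd hab _
    have hba : b ≤ a := by omega
    have hab2 : a = b := le_antisymm hab hba
    rw [PySem.List.pyRange_one_eq_nil hba]
    simp [hab2]
  | succ d ih =>
    intro a hd hab hstep
    have hlt : a < b := by omega
    rw [PySem.List.pyRange_one_cons hlt]
    simp only [List.foldl_cons]
    rw [hstep a le_rfl hlt]
    exact ih (a + 1) (by omega) (by omega) (fun c hc1 hc2 => hstep c (by omega) hc2)

theorem replicate_eq_map_range {α : Type} (n : Nat) (x : α) :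
    List.replicate n x = (List.range n).map (fun _ => x) := by
  apply List.ext_getElem <;> simp

theorem map_range_congr {α : Type} (f g : Nat → α) (n : Nat)
    (h : ∀ j, j < n → f j = g j) : (List.range n).map f = (List.range n).map g := by
  apply List.map_congr_left
  intro a ha
  exact h a (List.mem_range.mp ha)

theorem getD_map_range' {α : Type} (f : Nat → α) (n : Nat) (i : Int) (d : α)
    (h0 : 0 ≤ i) (hn : i < (n : Int)) :
    PySem.List.pyGetD ((List.range n).map f) i d = f i.toNat := by
  rw [PySem.List.pyGetD_eq_getElem _ d h0 (by simpa using hn)]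
  simp

theorem setD_map_range {α : Type} (f : Nat → α) (n : Nat) (i : Int) (v : α)
    (h0 : 0 ≤ i) (_hn : i < (n : Int)) :
    PySem.List.pySetD ((List.range n).map f) i v
      = (List.range n).map (fun (j : Nat) => if (j : Int) = i then v else f j) := by
  rw [PySem.List.pySetD_of_nonneg _ v h0]
  apply List.ext_getElem (by simp)
  intro k h1 h2
  simp only [List.getElem_set, List.getElem_map, List.getElem_range]
  by_cases hk : (k : Int) = i
  · rw [if_pos (by omega), if_pos hk]
  · rw [if_neg (by omega), if_neg hk]

-- ---- A side: the partially filled table after the outer loop reached column r and the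
-- inner loop reached row c0
def tblP (N K P : Int) (r : Int) (c0 : Int) : List (List Int) :=
  (List.range (N + 1).toNat).map (fun (c : Nat) => (List.range (K + 1).toNat).map (fun (j : Nat) =>
    if 1 ≤ (c : Int) ∧ ((j : Int) < r ∨ ((j : Int) = r ∧ (c : Int) < c0))
    then cnt N P j (c : Int) else -1))

theorem tblP_get (N K P r c0 i j : Int) (hN : 2 ≤ N) (hK : 1 ≤ K)
    (hi0 : 0 ≤ i) (hiN : i ≤ N) (hj0 : 0 ≤ j) (hjK : j ≤ K) :
    PySem.List.pyGetD (PySem.List.pyGetD (tblP N K P r c0) i []) j 0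
      = if 1 ≤ i ∧ (j < r ∨ (j = r ∧ i < c0)) then cnt N P j.toNat i else -1 := by
  unfold tblP
  rw [getD_map_range' _ _ i [] hi0 (by omega)]
  rw [getD_map_range' _ _ j 0 hj0 (by omega)]
  simp only [Int.toNat_of_nonneg hi0, Int.toNat_of_nonneg hj0]

theorem stepA_tblP (N K P r c0 : Int) (hN : 2 ≤ N) (hK : 1 ≤ K)
    (hr0 : 0 ≤ r) (hrK : r ≤ K) (hc1 : 1 ≤ c0) (hcN : c0 ≤ N) :
    stepA N P r (tblP N K P r c0) c0 = tblP N K P r (c0 + 1) := by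
  have hc00 : (0 : Int) ≤ c0 := by omega
  have hv : (if r = 0 then (if c0 = P then (1 : Int) else 0)
      else if c0 = 1 then PySem.List.pyGetD (PySem.List.pyGetD (tblP N K P r c0) 2 []) (r - 1) 0
      else if c0 = N then PySem.List.pyGetD (PySem.List.pyGetD (tblP N K P r c0) (N - 1) []) (r - 1) 0
      else PySem.List.pyGetD (PySem.List.pyGetD (tblP N K P r c0) (c0 - 1) []) (r - 1) 0
           + PySem.List.pyGetD (PySem.List.pyGetD (tblP N K P r c0) (c0 + 1) []) (r - 1) 0)
      = cnt N P r.toNat c0 := by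
    by_cases hr : r = 0
    · subst hr
      norm_num [cnt]
    · rw [if_neg hr]
      have hrr : r.toNat = (r - 1).toNat + 1 := by omega
      rw [hrr]
      by_cases h1 : c0 = 1
      · rw [if_pos h1, tblP_get N K P r c0 2 (r - 1) hN hK (by omega) (by omega) (by omega) (by omega)]
        rw [if_pos ⟨by omega, Or.inl (by omega)⟩, h1]
        simp [cnt]
      · rw [if_neg h1]
        by_cases h2 : c0 = N
        · rw [if_pos h2, tblP_get N K P r c0 (N - 1) (r - 1) hN hK (by omega) (by omega) (by omega) (by omega)]
          rw [if_pos ⟨by omega, Or.inl (by omega)⟩, h2]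
          simp [cnt]
          omega
        · rw [if_neg h2,
            tblP_get N K P r c0 (c0 - 1) (r - 1) hN hK (by omega) (by omega) (by omega) (by omega),
            tblP_get N K P r c0 (c0 + 1) (r - 1) hN hK (by omega) (by omega) (by omega) (by omega)]
          rw [if_pos ⟨by omega, Or.inl (by omega)⟩, if_pos ⟨by omega, Or.inl (by omega)⟩]
          simp only [cnt]
          rw [if_neg h1, if_neg h2]
  have key : stepA N P r (tblP N K P r c0) c0
      = PySem.List.pySetD (tblP N K P r c0) c0
          (PySem.List.pySetD (PySem.List.pyGetD (tblP N K P r c0) c0 []) r (cnt N P r.toNat c0)) := by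
    unfold stepA
    rw [← hv]
  rw [key]
  conv_lhs => rw [tblP]
  rw [getD_map_range' _ _ c0 [] hc00 (by omega)]
  simp only [Int.toNat_of_nonneg hc00]
  rw [setD_map_range _ _ r _ hr0 (by omega)]
  rw [setD_map_range _ _ c0 _ hc00 (by omega)]
  unfold tblP
  apply map_range_congr
  intro c hc
  by_cases hcc : (c : Int) = c0
  · rw [if_pos hcc]
    apply map_range_congr
    intro j hj
    by_cases hjr : (j : Int) = r
    · rw [if_pos hjr, if_pos (by omega)]
      have hjn : j = r.toNat := by omega
      rw [hjn, hcc]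
    · rw [if_neg hjr]
      have hiff : (1 ≤ c0 ∧ ((j : Int) < r ∨ ((j : Int) = r ∧ c0 < c0)))
          ↔ (1 ≤ (c : Int) ∧ ((j : Int) < r ∨ ((j : Int) = r ∧ (c : Int) < c0 + 1))) := by
        constructor <;> intro h <;> omega
      simp only [hiff, hcc]
  · rw [if_neg hcc]
    apply map_range_congr
    intro j hj
    have hiff : (1 ≤ (c : Int) ∧ ((j : Int) < r ∨ ((j : Int) = r ∧ (c : Int) < c0)))
        ↔ (1 ≤ (c : Int) ∧ ((j : Int) < r ∨ ((j : Int) = r ∧ (c : Int) < c0 + 1))) := by omega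
    simp only [hiff]

theorem tblP_top (N K P r : Int) (hN : 2 ≤ N) (_hr : 0 ≤ r) :
    tblP N K P r (N + 1) = tblP N K P (r + 1) 1 := by
  unfold tblP
  apply map_range_congr
  intro c hc
  apply map_range_congr
  intro j hj
  have hcb : (c : Int) < N + 1 := by omega
  have hiff : (1 ≤ (c : Int) ∧ ((j : Int) < r ∨ ((j : Int) = r ∧ (c : Int) < N + 1)))
      ↔ (1 ≤ (c : Int) ∧ ((j : Int) < r + 1 ∨ ((j : Int) = r + 1 ∧ (c : Int) < 1))) := by omega
  simp only [hiff]

theorem rowLoopA_tblP (N K P r : Int) (hN : 2 ≤ N) (hK : 1 ≤ K) (hr0 : 0 ≤ r) (hrK : r ≤ K) :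
    rowLoopA N P (tblP N K P r 1) r = tblP N K P (r + 1) 1 := by
  unfold rowLoopA
  rw [foldl_pyRange_inv (stepA N P r) (fun c0 => tblP N K P r c0) (N + 1) (N + 1 - 1).toNat 1 rfl
    (by omega) (fun c hc1 hc2 => stepA_tblP N K P r c hN hK hr0 hrK hc1 (by omega))]
  exact tblP_top N K P r hN hr0

theorem A_eq_cnt (N M K P : Int) (hN : 2 ≤ N) (hM1 : 1 ≤ M) (hMN : M ≤ N)
    (hK : 1 ≤ K) (hP1 : 1 ≤ P) (hPN : P ≤ N) :
    RobotWalk3 N M K P = cnt N P K.toNat M := by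
  unfold RobotWalk3
  rw [if_neg (by omega)]
  have h0 : List.replicate (N + 1).toNat (List.replicate (K + 1).toNat (-1 : Int))
      = tblP N K P 0 1 := by
    rw [replicate_eq_map_range]
    unfold tblP
    apply map_range_congr
    intro c hc
    rw [replicate_eq_map_range]
    apply map_range_congr
    intro j hj
    rw [if_neg (by omega)]
  simp only [h0]
  rw [foldl_pyRange_inv (rowLoopA N P) (fun r => tblP N K P r 1) (K + 1) (K + 1 - 0).toNat 0 rfl
    (by omega) (fun r hr1 hr2 => rowLoopA_tblP N K P r hN hK hr1 (by omega))]
  rw [tblP_get N K P (K + 1) 1 M K hN hK (by omega) (by omega) (by omega) (by omega)]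
  rw [if_pos ⟨by omega, Or.inl (by omega)⟩]

-- ---- B side: entry functions of the rolling vector and of the partially scattered
-- next vector, and the vectors themselves
def vent (N M : Int) (t : Nat) (x : Int) : Int :=
  if 1 ≤ x ∧ x ≤ N then cnt N M t x else 0

def pent (N M : Int) (t : Nat) (c0 : Int) (x : Int) : Int :=
  (if 2 ≤ x ∧ x ≤ N ∧ x - 1 < c0 then cnt N M t (x - 1) else 0)
  + (if 1 ≤ x ∧ x ≤ N - 1 ∧ x + 1 < c0 then cnt N M t (x + 1) else 0)

def vecB (N M : Int) (t : Nat) : List Int :=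
  (List.range (N + 2).toNat).map (fun (j : Nat) => vent N M t (j : Int))

def pvB (N M : Int) (t : Nat) (c0 : Int) : List Int :=
  (List.range (N + 2).toNat).map (fun (j : Nat) => pent N M t c0 (j : Int))

theorem vecB_get (N M : Int) (t : Nat) (i : Int) (h0 : 0 ≤ i) (hi : i ≤ N + 1) :
    PySem.List.pyGetD (vecB N M t) i 0 = vent N M t i := by
  unfold vecB
  rw [getD_map_range' _ _ i 0 h0 (by omega)]
  rw [Int.toNat_of_nonneg h0]

theorem pvB_get (N M : Int) (t : Nat) (c0 i : Int) (h0 : 0 ≤ i) (hi : i ≤ N + 1) :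
    PySem.List.pyGetD (pvB N M t c0) i 0 = pent N M t c0 i := by
  unfold pvB
  rw [getD_map_range' _ _ i 0 h0 (by omega)]
  rw [Int.toNat_of_nonneg h0]

theorem pvB_set (N M : Int) (t : Nat) (c0 i : Int) (v : Int) (h0 : 0 ≤ i) (hi : i ≤ N + 1) :
    PySem.List.pySetD (pvB N M t c0) i v
      = (List.range (N + 2).toNat).map
          (fun (j : Nat) => if (j : Int) = i then v else pent N M t c0 (j : Int)) := by
  unfold pvB
  rw [setD_map_range _ _ i v h0 (by omega)]

-- entries not adjacent to the scattered cell (or outside 1..N) are unchanged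
theorem pent_stable (N M : Int) (t : Nat) (c0 x : Int)
    (hx : (¬ x = c0 + 1 ∧ ¬ x = c0 - 1) ∨ x < 1 ∨ N < x) :
    pent N M t (c0 + 1) x = pent N M t c0 x := by
  unfold pent
  have ha : (2 ≤ x ∧ x ≤ N ∧ x - 1 < c0 + 1) ↔ (2 ≤ x ∧ x ≤ N ∧ x - 1 < c0) := by omega
  have hb : (1 ≤ x ∧ x ≤ N - 1 ∧ x + 1 < c0 + 1) ↔ (1 ≤ x ∧ x ≤ N - 1 ∧ x + 1 < c0) := by omega
  simp only [ha, hb]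

theorem pent_up (N M : Int) (t : Nat) (c0 : Int) (h1 : 1 ≤ c0) (h2 : c0 + 1 ≤ N) :
    pent N M t (c0 + 1) (c0 + 1) = pent N M t c0 (c0 + 1) + cnt N M t c0 := by
  unfold pent
  rw [if_pos (show 2 ≤ c0 + 1 ∧ c0 + 1 ≤ N ∧ c0 + 1 - 1 < c0 + 1 by omega),
      if_neg (show ¬ (1 ≤ c0 + 1 ∧ c0 + 1 ≤ N - 1 ∧ c0 + 1 + 1 < c0 + 1) by omega),
      if_neg (show ¬ (2 ≤ c0 + 1 ∧ c0 + 1 ≤ N ∧ c0 + 1 - 1 < c0) by omega),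
      if_neg (show ¬ (1 ≤ c0 + 1 ∧ c0 + 1 ≤ N - 1 ∧ c0 + 1 + 1 < c0) by omega)]
  have : c0 + 1 - 1 = c0 := by omega
  rw [this]
  ring

theorem pent_dn (N M : Int) (t : Nat) (c0 : Int) (h1 : 2 ≤ c0) (h2 : c0 ≤ N) :
    pent N M t (c0 + 1) (c0 - 1) = pent N M t c0 (c0 - 1) + cnt N M t c0 := by
  unfold pent
  rw [if_pos (show 1 ≤ c0 - 1 ∧ c0 - 1 ≤ N - 1 ∧ c0 - 1 + 1 < c0 + 1 by omega),
      if_neg (show ¬ (1 ≤ c0 - 1 ∧ c0 - 1 ≤ N - 1 ∧ c0 - 1 + 1 < c0) by omega)]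
  have ha : (2 ≤ c0 - 1 ∧ c0 - 1 ≤ N ∧ c0 - 1 - 1 < c0 + 1)
      ↔ (2 ≤ c0 - 1 ∧ c0 - 1 ≤ N ∧ c0 - 1 - 1 < c0) := by omega
  simp only [ha]
  have : c0 - 1 + 1 = c0 := by omega
  rw [this]
  ring

theorem pvB_bot (N M : Int) (t : Nat) (_hN : 2 ≤ N) :
    pvB N M t 1 = List.replicate (N + 2).toNat 0 := by
  unfold pvB
  rw [replicate_eq_map_range]
  apply map_range_congr
  intro j hj
  unfold pent
  rw [if_neg (by omega), if_neg (by omega)]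
  simp

theorem pvB_top (N M : Int) (t : Nat) (hN : 2 ≤ N) :
    pvB N M t (N + 1) = vecB N M (t + 1) := by
  unfold pvB vecB
  apply map_range_congr
  intro j hj
  unfold pent vent
  simp only [cnt]
  by_cases hin : 1 ≤ (j : Int) ∧ (j : Int) ≤ N
  · rw [if_pos hin]
    by_cases h1 : (j : Int) = 1
    · rw [if_pos h1, if_neg (by omega), if_pos (by omega), h1]
      norm_num
    · by_cases h2 : (j : Int) = N
      · rw [if_neg h1, if_pos h2, if_pos (by omega), if_neg (by omega), h2]
        norm_num
      · rw [if_neg h1, if_neg h2, if_pos (by omega), if_pos (by omega)]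
  · rw [if_neg hin, if_neg (by omega), if_neg (by omega)]
    simp

theorem stepB_pvB (N M : Int) (t : Nat) (c0 : Int) (hN : 2 ≤ N)
    (hc1 : 1 ≤ c0) (hcN : c0 ≤ N) :
    stepB N (vecB N M t) (pvB N M t c0) c0 = pvB N M t (c0 + 1) := by
  have hv : PySem.List.pyGetD (vecB N M t) c0 0 = cnt N M t c0 := by
    rw [vecB_get N M t c0 (by omega) (by omega)]
    unfold vent
    rw [if_pos ⟨hc1, hcN⟩]
  unfold stepB
  rw [hv]
  by_cases h1 : c0 = 1
  · rw [if_pos h1]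
    subst h1
    rw [pvB_get N M t 1 2 (by omega) (by omega)]
    rw [pvB_set N M t 1 2 _ (by omega) (by omega)]
    conv_rhs => rw [pvB]
    apply map_range_congr
    intro j hj
    by_cases hj2 : (j : Int) = 2
    · rw [if_pos hj2, hj2]
      exact (pent_up N M t 1 (by omega) (by omega)).symm
    · rw [if_neg hj2]
      exact (pent_stable N M t 1 (j : Int) (by omega)).symm
  · rw [if_neg h1]
    by_cases h2 : c0 = N
    · rw [if_pos h2]
      rw [pvB_get N M t c0 (N - 1) (by omega) (by omega)]
      rw [pvB_set N M t c0 (N - 1) _ (by omega) (by omega)]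
      conv_rhs => rw [pvB]
      apply map_range_congr
      intro j hj
      by_cases hjn : (j : Int) = N - 1
      · rw [if_pos hjn, hjn]
        rw [show (N : Int) - 1 = c0 - 1 by omega]
        exact (pent_dn N M t c0 (by omega) (by omega)).symm
      · rw [if_neg hjn]
        exact (pent_stable N M t c0 (j : Int) (by omega)).symm
    · rw [if_neg h2]
      have hmid : 2 ≤ c0 ∧ c0 ≤ N - 1 := by omega
      show PySem.List.pySetD
          (PySem.List.pySetD (pvB N M t c0) (c0 - 1)
            (PySem.List.pyGetD (pvB N M t c0) (c0 - 1) 0 + cnt N M t c0)) (c0 + 1)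
          (PySem.List.pyGetD
            (PySem.List.pySetD (pvB N M t c0) (c0 - 1)
              (PySem.List.pyGetD (pvB N M t c0) (c0 - 1) 0 + cnt N M t c0)) (c0 + 1) 0
           + cnt N M t c0)
        = pvB N M t (c0 + 1)
      rw [pvB_get N M t c0 (c0 - 1) (by omega) (by omega)]
      rw [pvB_set N M t c0 (c0 - 1) _ (by omega) (by omega)]
      rw [getD_map_range' _ _ (c0 + 1) 0 (by omega) (by omega)]
      rw [setD_map_range _ _ (c0 + 1) _ (by omega) (by omega)]
      simp only [Int.toNat_of_nonneg (show (0 : Int) ≤ c0 + 1 by omega)]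
      rw [if_neg (show ¬ ((c0 + 1 : Int) = c0 - 1) by omega)]
      conv_rhs => rw [pvB]
      apply map_range_congr
      intro j hj
      by_cases hjp : (j : Int) = c0 + 1
      · rw [if_pos hjp, hjp]
        exact (pent_up N M t c0 (by omega) (by omega)).symm
      · rw [if_neg hjp]
        by_cases hjm : (j : Int) = c0 - 1
        · rw [if_pos hjm, hjm]
          exact (pent_dn N M t c0 (by omega) (by omega)).symm
        · rw [if_neg hjm]
          exact (pent_stable N M t c0 (j : Int) (by omega)).symm

theorem stepRowB_vecB (N M : Int) (t : Nat) (hN : 2 ≤ N) :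
    stepRowB N (vecB N M t) = vecB N M (t + 1) := by
  unfold stepRowB
  rw [← pvB_bot N M t hN]
  rw [foldl_pyRange_inv (stepB N (vecB N M t)) (fun c0 => pvB N M t c0) (N + 1)
    (N + 1 - 1).toNat 1 rfl (by omega)
    (fun c hcc1 hcc2 => stepB_pvB N M t c hN hcc1 (by omega))]
  exact pvB_top N M t hN

theorem B_eq_cnt (N M K P : Int) (hN : 2 ≤ N) (hM1 : 1 ≤ M) (hMN : M ≤ N)
    (hK : 1 ≤ K) (hP1 : 1 ≤ P) (hPN : P ≤ N) :
    RobotWalk3_alt N M K P = cnt N M K.toNat P := by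
  unfold RobotWalk3_alt
  rw [if_neg (by omega)]
  have h0 : PySem.List.pySetD (List.replicate (N + 2).toNat 0) M 1 = vecB N M 0 := by
    rw [replicate_eq_map_range]
    rw [setD_map_range _ _ M 1 (by omega) (by omega)]
    unfold vecB
    apply map_range_congr
    intro j hj
    unfold vent
    simp only [cnt]
    by_cases hjM : (j : Int) = M
    · rw [if_pos hjM, if_pos (by omega)]
    · rw [if_neg hjM]
      simp
  simp only [h0]
  have hS0 : vecB N M 0 = vecB N M ((0 : Int)).toNat := rfl
  rw [hS0]
  rw [foldl_pyRange_inv (fun w _ => stepRowB N w) (fun c => vecB N M c.toNat) K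
    (K - 0).toNat 0 rfl (by omega)
    (fun c hc1 hc2 => by
      show stepRowB N (vecB N M c.toNat) = vecB N M (c + 1).toNat
      rw [show (c + 1).toNat = c.toNat + 1 by omega]
      exact stepRowB_vecB N M c.toNat hN)]
  rw [vecB_get N M K.toNat P (by omega) (by omega)]
  unfold vent
  rw [if_pos ⟨hP1, hPN⟩]

-- ---- symmetry: the walk count is symmetric in its two endpoints
theorem cnt_last (N : Int) (hN : 2 ≤ N) :
    ∀ (r : Nat) (p m : Int), 1 ≤ p → p ≤ N → 1 ≤ m → m ≤ N →
    cnt N p (r + 1) m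
      = (if p = 1 then cnt N 2 r m
         else if p = N then cnt N (N - 1) r m
         else cnt N (p - 1) r m + cnt N (p + 1) r m) := by
  have unf : ∀ (q x : Int) (s : Nat), cnt N q (s + 1) x
      = if x = 1 then cnt N q s 2
        else if x = N then cnt N q s (N - 1)
        else cnt N q s (x - 1) + cnt N q s (x + 1) := fun q x s => rfl
  intro r
  induction r with
  | zero =>
    intro p m hp1 hpN hm1 hmN
    simp only [cnt]
    split_ifs <;> omega
  | succ r ih =>
    intro p m hp1 hpN hm1 hmN
    rw [unf p m (r + 1)]
    by_cases hm : m = 1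
    · rw [if_pos hm]
      rw [ih p 2 hp1 hpN (by omega) (by omega)]
      have hR : ∀ q : Int, cnt N q (r + 1) m = cnt N q r 2 := by
        intro q; rw [unf, if_pos hm]
      simp only [hR]
    · rw [if_neg hm]
      by_cases hmN2 : m = N
      · rw [if_pos hmN2]
        rw [ih p (N - 1) hp1 hpN (by omega) (by omega)]
        have hR : ∀ q : Int, cnt N q (r + 1) m = cnt N q r (N - 1) := by
          intro q; rw [unf, if_neg hm, if_pos hmN2]
        simp only [hR]
      · rw [if_neg hmN2]
        rw [ih p (m - 1) hp1 hpN (by omega) (by omega),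
            ih p (m + 1) hp1 hpN (by omega) (by omega)]
        have hR : ∀ q : Int, cnt N q (r + 1) m = cnt N q r (m - 1) + cnt N q r (m + 1) := by
          intro q; rw [unf, if_neg hm, if_neg hmN2]
        simp only [hR]
        split_ifs <;> ring

theorem cnt_swap (N : Int) (hN : 2 ≤ N) :
    ∀ (r : Nat) (m p : Int), 1 ≤ m → m ≤ N → 1 ≤ p → p ≤ N →
    cnt N p r m = cnt N m r p := by
  intro r
  induction r with
  | zero =>
    intro m p hm1 hmN hp1 hpN
    simp only [cnt]
    split_ifs <;> omega
  | succ r ih =>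
    intro m p hm1 hmN hp1 hpN
    rw [cnt_last N hN r m p hm1 hmN hp1 hpN]
    have unf : cnt N p (r + 1) m
        = if m = 1 then cnt N p r 2
          else if m = N then cnt N p r (N - 1)
          else cnt N p r (m - 1) + cnt N p r (m + 1) := rfl
    rw [unf]
    by_cases hm : m = 1
    · rw [if_pos hm, if_pos hm]
      exact ih 2 p (by omega) (by omega) hp1 hpN
    · rw [if_neg hm, if_neg hm]
      by_cases hm2 : m = N
      · rw [if_pos hm2, if_pos hm2]
        exact ih (N - 1) p (by omega) (by omega) hp1 hpN
      · rw [if_neg hm2, if_neg hm2]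
        rw [ih (m - 1) p (by omega) (by omega) hp1 hpN,
            ih (m + 1) p (by omega) (by omega) hp1 hpN]

-- ===== VERDICT (by name: the statement is the Claim_ definition above) =====
theorem RobotWalk3_spec : Claim_equal_RobotWalk3 := by
  intro N M K P _
  unfold Spec_RobotWalk3
  by_cases hg : N < 2 ∨ M < 1 ∨ K < 1 ∨ M > N ∨ P < 1 ∨ P > N
  · simp only [RobotWalk3, RobotWalk3_alt, if_pos hg]
  · push Not at hg
    obtain ⟨h1, h2, h3, h4, h5, h6⟩ := hg
    rw [A_eq_cnt N M K P (by omega) (by omega) (by omega) (by omega) (by omega) (by omega)]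
    rw [B_eq_cnt N M K P (by omega) (by omega) (by omega) (by omega) (by omega) (by omega)]
    exact cnt_swap N (by omega) K.toNat M P (by omega) (by omega) (by omega) (by omega)
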